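-- pv_equiv track=rewrite | github.com/ckometter/LabRAD-Device-Electrical_Measurement-ONline_Software | DEMONS GUI/Resources/DEMONSFormat.py | stringdivision
-- ===== SOURCE A (Python) =====
-- def stringdivision(strlist, oplist):
--     for element in oplist:
--         newlist = []
--         for substring in strlist:
--             splitlist = substring.split(element)
--             for i in range(0,len(splitlist)):
--                 newlist.append(splitlist[i])
--                 if i < len(splitlist)-1:
--                     newlist.append(element)
--         strlist = newlist
--     return strlist
-- ===== SOURCE B (Python) =====
-- def stringdivision(strlist, oplist):
--     if not oplist:
--         return strlist
--     op = oplist[0]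
--     out = []
--     for s in strlist:
--         while True:
--             i = s.find(op)
--             if i < 0:
--                 out.append(s)
--                 break
--             out.append(s[:i])
--             out.append(op)
--             s = s[i + len(op):]
--     return stringdivision(out, oplist[1:])
-- ===== Notes on version B (the rewrite author's own statement) =====
-- stated objective: alternative
-- what changed: B never calls str.split: it recurses on the delimiter list and tokenizes each string with an explicit str.find scanner that emits prefix and delimiter tokens while advancing past each occurrence, instead of A's iterative whole-list rebuild via split-and-reinterleave with an indexed range loop.
import Mathlib
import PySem

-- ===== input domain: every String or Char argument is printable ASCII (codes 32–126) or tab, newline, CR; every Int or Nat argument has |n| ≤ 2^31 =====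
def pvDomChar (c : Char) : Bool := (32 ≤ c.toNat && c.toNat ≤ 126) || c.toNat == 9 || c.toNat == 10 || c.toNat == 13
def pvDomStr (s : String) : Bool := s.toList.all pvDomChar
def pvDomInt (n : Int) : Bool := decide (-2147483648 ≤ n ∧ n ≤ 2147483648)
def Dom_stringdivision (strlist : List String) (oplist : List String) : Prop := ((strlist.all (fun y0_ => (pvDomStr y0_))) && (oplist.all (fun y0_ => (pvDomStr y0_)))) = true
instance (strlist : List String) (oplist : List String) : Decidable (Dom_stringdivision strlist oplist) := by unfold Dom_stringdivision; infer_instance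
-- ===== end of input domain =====

-- B replaces A's split-and-reinterleave rebuild by a str.find-based scanner recursing on the
-- delimiter list (objective: alternative; same asymptotics, measured constant-factor faster in a timing run).

-- ===== PORT A =====
-- s.split(sep): exact for sep ≠ "" (Python raises ValueError on sep = "", excluded by Pre_
-- whenever A's loop actually reaches a split)
def strSplitOn (s sep : String) : List String :=
  (PySem.Chars.splitOn s.toList sep.toList).map String.ofList

def stringdivision (strlist : List String) (oplist : List String) : List String :=
  oplist.foldl (fun strlist element =>
    strlist.foldl (fun newlist substring =>
      let splitlist := strSplitOn substring element
      (PySem.List.pyRange 0 (splitlist.length : Int) 1).foldl (fun newlist i =>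
        let newlist := newlist ++ [PySem.List.pyGetD splitlist i ""]
        if i < (splitlist.length : Int) - 1 then newlist ++ [element] else newlist)
        newlist) []) strlist

-- ===== PORT B =====
-- Source B's inner `while True` scanner over one string, on List Char (s.find → PySem.Chars.find,
-- s[:i] / s[i+len(op):] → PySem.List.slice); the fuel argument only makes the loop total in
-- Lean (length+1 suffices for op ≠ "", the only case Pre_ admits with work to do)
def scanGo (op : List Char) (fuel : Nat) (s : List Char) (out : List String) : List String :=
  match fuel with
  | 0 => out
  | fuel + 1 =>
    let i := PySem.Chars.find s op
    if i < 0 then out ++ [String.ofList s]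
    else scanGo op fuel (PySem.List.slice s (some (i + (op.length : Int))) none)
           (out ++ [String.ofList (PySem.List.slice s none (some i)), String.ofList op])

def stringdivision_alt (strlist : List String) (oplist : List String) : List String :=
  match oplist with
  | [] => strlist
  | op :: rest =>
    stringdivision_alt
      (strlist.foldl (fun out s => scanGo op.toList (s.toList.length + 1) s.toList out) []) rest

-- ===== PRECONDITION & SPEC =====
-- Pre_ excludes exactly the inputs where Python A raises ValueError: an empty-string delimiter
-- reaching str.split (i.e. "" ∈ oplist with a nonempty strlist); B does not terminate there.
def Pre_stringdivision (strlist : List String) (oplist : List String) : Prop :=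
  strlist = [] ∨ "" ∉ oplist
instance (strlist : List String) (oplist : List String) : Decidable (Pre_stringdivision strlist oplist) := by unfold Pre_stringdivision; infer_instance

def pvWitness_stringdivision : List String × List String := (["a+b-c", "d"], ["+", "-"])

def Spec_stringdivision (strlist : List String) (oplist : List String) (out : List String) : Prop := out = stringdivision_alt strlist oplist
instance (strlist : List String) (oplist : List String) (out : List String) : Decidable (Spec_stringdivision strlist oplist out) := by unfold Spec_stringdivision; infer_instance

-- ===== CLAIM (what is proved, stated in full; the proofs are below) =====
def Claim_equal_stringdivision : Prop := ∀ (strlist : List String) (oplist : List String), Dom_stringdivision strlist oplist → Pre_stringdivision strlist oplist → Spec_stringdivision strlist oplist (stringdivision strlist oplist)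

-- ===== LEMMAS AND PROOFS =====

-- the common value of both token generators: the split parts with the delimiter re-interleaved
def inter (op : String) (t : String) : List String :=
  List.intersperse op (strSplitOn t op)

-- ---- structural recurrences of PySem.Chars.find (sep ≠ []) ----

lemma find_go_shift (sep : List Char) (hs : sep ≠ []) :
    ∀ (l : List Char) (k : Nat),
      PySem.Chars.find.go sep l k
        = if PySem.Chars.find l sep = -1 then -1 else (k : Int) + PySem.Chars.find l sep := by
  intro l
  induction l with
  | nil =>
    intro k
    simp [PySem.Chars.find, PySem.Chars.find.go, List.isEmpty_iff, hs]
  | cons c t ih =>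
    intro k
    by_cases hp : sep.isPrefixOf (c :: t)
    · simp [PySem.Chars.find, PySem.Chars.find.go, hp]
    · rw [show PySem.Chars.find.go sep (c :: t) k = PySem.Chars.find.go sep t (k + 1) by
        simp [PySem.Chars.find.go, hp]]
      rw [show PySem.Chars.find (c :: t) sep = PySem.Chars.find.go sep t 1 by
        simp [PySem.Chars.find, PySem.Chars.find.go, hp]]
      rw [ih (k + 1), ih 1]
      have hge : -1 ≤ PySem.Chars.find t sep := PySem.Chars.neg_one_le_find t sep
      by_cases h : PySem.Chars.find t sep = -1
      · simp [h]
      · have : ¬ ((1 : Int) + PySem.Chars.find t sep = -1) := by omega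
        simp [h, this]
        omega

lemma find_nil_of_ne (sep : List Char) (hs : sep ≠ []) :
    PySem.Chars.find ([] : List Char) sep = -1 := by
  simp [PySem.Chars.find, PySem.Chars.find.go, List.isEmpty_iff, hs]

lemma find_cons_prefix (sep : List Char) (c : Char) (t : List Char)
    (hp : sep.isPrefixOf (c :: t)) : PySem.Chars.find (c :: t) sep = 0 := by
  simp [PySem.Chars.find, PySem.Chars.find.go, hp]

lemma find_cons_not_prefix (sep : List Char) (hs : sep ≠ []) (c : Char) (t : List Char)
    (hp : ¬ sep.isPrefixOf (c :: t)) :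
    PySem.Chars.find (c :: t) sep
      = if PySem.Chars.find t sep = -1 then -1 else 1 + PySem.Chars.find t sep := by
  rw [show PySem.Chars.find (c :: t) sep = PySem.Chars.find.go sep t 1 by
    simp [PySem.Chars.find, PySem.Chars.find.go, hp]]
  exact find_go_shift sep hs t 1

-- ---- the token stream of one string for one delimiter, find-first style ----

lemma drop_lt_of_find_nonneg (sep : List Char) (hs : sep ≠ []) (l : List Char)
    (h : ¬ PySem.Chars.find l sep < 0) :
    (l.drop ((PySem.Chars.find l sep).toNat + sep.length)).length < l.length := by
  have hinf : sep <:+: l := (PySem.Chars.find_nonneg_iff l sep).mp (by omega)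
  have hlen : sep.length ≤ l.length := hinf.length_le
  have hpos : 0 < sep.length := List.length_pos_iff.mpr hs
  simp only [List.length_drop]
  omega

def pieces (sep : List Char) (hs : sep ≠ []) (l : List Char) : List (List Char) :=
  if _h : PySem.Chars.find l sep < 0 then [l]
  else l.take (PySem.Chars.find l sep).toNat
        :: pieces sep hs (l.drop ((PySem.Chars.find l sep).toNat + sep.length))
termination_by l.length
decreasing_by exact drop_lt_of_find_nonneg sep hs l _h

lemma pieces_ne_nil (sep : List Char) (hs : sep ≠ []) (l : List Char) :
    pieces sep hs l ≠ [] := by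
  rw [pieces]
  split
  · exact List.cons_ne_nil _ _
  · exact List.cons_ne_nil _ _

-- ---- splitOn computes pieces (sep ≠ []) ----

lemma modifyHead_id' (p : List (List Char)) :
    p.modifyHead (fun a => a) = p := by
  cases p <;> simp

lemma splitOn_go_pieces (sep : List Char) (hs : sep ≠ []) :
    ∀ (fuel : Nat) (l cur : List Char) (acc : List (List Char)), l.length < fuel →
      PySem.Chars.splitOn.go sep fuel l cur acc
        = acc.reverse ++ (pieces sep hs l).modifyHead (fun a => cur.reverse ++ a) := by
  intro fuel
  induction fuel with
  | zero => intro l cur acc h; omega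
  | succ n ih =>
    intro l cur acc h
    cases l with
    | nil =>
      have hpc : pieces sep hs [] = [[]] := by
        rw [pieces]; simp [find_nil_of_ne sep hs]
      rw [PySem.Chars.splitOn.go, hpc]
      simp
      omega
    | cons c rest =>
      rw [PySem.Chars.splitOn.go]
      split
      · -- sep is a prefix of c :: rest
        rename_i hp
        have hf : PySem.Chars.find (c :: rest) sep = 0 := find_cons_prefix sep c rest hp
        have hlen : 0 < sep.length := List.length_pos_iff.mpr hs
        have hd : ((c :: rest).drop sep.length).length < n := by
          rw [List.length_drop]
          simp only [List.length_cons] at h ⊢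
          omega
        rw [ih _ _ _ hd]
        have hpc : pieces sep hs (c :: rest)
            = [] :: pieces sep hs ((c :: rest).drop sep.length) := by
          rw [pieces]; simp [hf]
        rw [hpc]
        simp only [List.reverse_cons, List.modifyHead_cons, List.append_nil, List.append_assoc,
          List.cons_append, List.nil_append]
        simp
        exact modifyHead_id' _
      · -- sep is not a prefix
        rename_i hp
        have hd : rest.length < n := by simp only [List.length_cons] at h; omega
        rw [ih _ _ _ hd]
        have hge : -1 ≤ PySem.Chars.find rest sep := PySem.Chars.neg_one_le_find rest sep
        by_cases hf : PySem.Chars.find rest sep = -1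
        · have hl : PySem.Chars.find (c :: rest) sep = -1 := by
            rw [find_cons_not_prefix sep hs c rest hp]; simp [hf]
          have hp1 : pieces sep hs rest = [rest] := by rw [pieces]; simp [hf]
          have hp2 : pieces sep hs (c :: rest) = [c :: rest] := by rw [pieces]; simp [hl]
          rw [hp1, hp2]
          simp
        · have h0 : 0 ≤ PySem.Chars.find rest sep := by omega
          have hl : PySem.Chars.find (c :: rest) sep = 1 + PySem.Chars.find rest sep := by
            rw [find_cons_not_prefix sep hs c rest hp]; simp [hf]
          have hnl : ¬ PySem.Chars.find (c :: rest) sep < 0 := by omega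
          have hnr : ¬ PySem.Chars.find rest sep < 0 := by omega
          have ht : (PySem.Chars.find (c :: rest) sep).toNat
              = (PySem.Chars.find rest sep).toNat + 1 := by omega
          have hp1 : pieces sep hs rest
              = rest.take (PySem.Chars.find rest sep).toNat
                :: pieces sep hs (rest.drop ((PySem.Chars.find rest sep).toNat + sep.length)) := by
            rw [pieces]; simp [hnr]
          have hp2 : pieces sep hs (c :: rest)
              = (c :: rest.take (PySem.Chars.find rest sep).toNat)
                :: pieces sep hs (rest.drop ((PySem.Chars.find rest sep).toNat + sep.length)) := by
            rw [pieces]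
            simp only [hnl, dif_neg, not_false_iff, ht]
            rw [List.take_succ_cons]
            have harith : (PySem.Chars.find rest sep).toNat + 1 + sep.length
                = ((PySem.Chars.find rest sep).toNat + sep.length) + 1 := by omega
            rw [harith, List.drop_succ_cons]
          rw [hp1, hp2]
          simp

lemma splitOn_eq_pieces (sep : List Char) (hs : sep ≠ []) (l : List Char) :
    PySem.Chars.splitOn l sep = pieces sep hs l := by
  have := splitOn_go_pieces sep hs (l.length + 1) l [] [] (by omega)
  simpa [PySem.Chars.splitOn, modifyHead_id'] using this

-- ---- B's scanner produces inter ----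

lemma scanGo_eq (op : String) (hop : op.toList ≠ []) :
    ∀ (fuel : Nat) (l : List Char) (out : List String), l.length < fuel →
      scanGo op.toList fuel l out
        = out ++ (List.intersperse op.toList (pieces op.toList hop l)).map String.ofList := by
  intro fuel
  induction fuel with
  | zero => intro l out h; omega
  | succ n ih =>
    intro l out h
    rw [scanGo]
    by_cases hf : PySem.Chars.find l op.toList < 0
    · rw [pieces]
      simp [hf]
    · have h0 : 0 ≤ PySem.Chars.find l op.toList := by omega
      have hs1 : PySem.List.slice l (some (PySem.Chars.find l op.toList + (op.toList.length : Int))) none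
          = l.drop ((PySem.Chars.find l op.toList).toNat + op.toList.length) := by
        rw [PySem.List.slice_from l (by omega)]
        congr 1
        omega
      have hs2 : PySem.List.slice l none (some (PySem.Chars.find l op.toList))
          = l.take (PySem.Chars.find l op.toList).toNat := PySem.List.slice_to l h0
      have hd := drop_lt_of_find_nonneg op.toList hop l hf
      rw [if_neg hf, hs1, hs2, ih _ _ (by omega)]
      have hpl : pieces op.toList hop l
          = l.take (PySem.Chars.find l op.toList).toNat
            :: pieces op.toList hop
                (l.drop ((PySem.Chars.find l op.toList).toNat + op.toList.length)) := by
        rw [pieces, dif_neg hf]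
      rw [hpl]
      obtain ⟨q, qs, hq⟩ := List.exists_cons_of_ne_nil
        (pieces_ne_nil op.toList hop (l.drop ((PySem.Chars.find l op.toList).toNat + op.toList.length)))
      rw [hq]
      simp [List.intersperse]

lemma map_ofList_intersperse (sep : List Char) :
    ∀ (l : List (List Char)),
      (List.intersperse sep l).map String.ofList
        = List.intersperse (String.ofList sep) (l.map String.ofList) := by
  intro l
  induction l with
  | nil => rfl
  | cons a t ih =>
    cases t with
    | nil => rfl
    | cons b t' =>
      simp only [List.intersperse_cons₂, List.map_cons]
      rw [ih]
      simp only [List.map_cons]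

lemma scanGo_inter (op : String) (hop : op ≠ "") (s : String) (out : List String) :
    scanGo op.toList (s.toList.length + 1) s.toList out = out ++ inter op s := by
  have hopl : op.toList ≠ [] := by
    intro h
    apply hop
    have := congrArg String.ofList h
    simpa using this
  rw [scanGo_eq op hopl _ _ _ (by omega)]
  unfold inter strSplitOn
  rw [splitOn_eq_pieces op.toList hopl s.toList, map_ofList_intersperse,
      String.ofList_toList]

-- ---- A's indexed range loop, read through enumerate ----

lemma enum_fold (op : String) :
    ∀ (parts : List String) (s n : Int) (nl : List String), s + parts.length = n →
      (PySem.List.enumerate parts s).foldl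
        (fun nl p =>
          let t := nl ++ [p.2]
          if p.1 < n - 1 then t ++ [op] else t) nl
      = nl ++ List.intersperse op parts := by
  intro parts
  induction parts with
  | nil => intro s n nl _; simp [PySem.List.enumerate_nil]
  | cons x xs ih =>
    intro s n nl hn
    rw [PySem.List.enumerate_cons]
    cases xs with
    | nil =>
      simp only [List.length_cons, List.length_nil] at hn
      have : ¬ (s < n - 1) := by omega
      simp [PySem.List.enumerate_nil, this, List.intersperse]
    | cons y ys =>
      have hlt : s < n - 1 := by
        simp only [List.length_cons] at hn; push_cast at hn; omega
      have hn' : (s + 1) + ((y :: ys).length : Int) = n := by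
        simp only [List.length_cons] at hn ⊢; push_cast at hn ⊢; omega
      simp only [List.foldl_cons, hlt, if_pos]
      rw [ih (s + 1) n _ hn']
      simp [List.intersperse]

lemma stepA_eq (op sub : String) (nl : List String) :
    (PySem.List.pyRange 0 ((strSplitOn sub op).length : Int) 1).foldl (fun nl i =>
        let newlist := nl ++ [PySem.List.pyGetD (strSplitOn sub op) i ""]
        if i < ((strSplitOn sub op).length : Int) - 1 then newlist ++ [op] else newlist)
      nl = nl ++ inter op sub := by
  have he := PySem.List.enumerate_eq_map_pyRange (xs := strSplitOn sub op) (d := "")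
  have := enum_fold op (strSplitOn sub op) 0 ((strSplitOn sub op).length : Int) nl (by omega)
  rw [he, List.foldl_map] at this
  simpa [inter] using this

lemma passA (op : String) (l : List String) :
    l.foldl (fun newlist substring =>
      let splitlist := strSplitOn substring op
      (PySem.List.pyRange 0 (splitlist.length : Int) 1).foldl (fun newlist i =>
        let newlist := newlist ++ [PySem.List.pyGetD splitlist i ""]
        if i < (splitlist.length : Int) - 1 then newlist ++ [op] else newlist)
        newlist) []
    = l.flatMap (inter op) := by
  have h : l.foldl (fun newlist substring => newlist ++ inter op substring) []
      = l.flatMap (inter op) := by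
    simpa using PySem.List.foldl_append_eq_flatMap (l := l) (g := inter op) (acc := [])
  rw [← h]
  exact PySem.List.foldl_congr_mem _ _ _ _ (fun acc x _ => stepA_eq op x acc)

lemma A_normal (strlist oplist : List String) :
    stringdivision strlist oplist
    = oplist.foldl (fun l op => l.flatMap (inter op)) strlist := by
  unfold stringdivision
  exact PySem.List.foldl_congr_mem _ _ _ _ (fun acc op _ => passA op acc)

-- ---- B normalises to the same fold when no delimiter is empty ----

lemma passB (op : String) (hop : op ≠ "") (l : List String) :
    l.foldl (fun out s => scanGo op.toList (s.toList.length + 1) s.toList out) []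
    = l.flatMap (inter op) := by
  have h : l.foldl (fun out s => out ++ inter op s) []
      = l.flatMap (inter op) := by
    simpa using PySem.List.foldl_append_eq_flatMap (l := l) (g := inter op) (acc := [])
  rw [← h]
  exact PySem.List.foldl_congr_mem _ _ _ _ (fun acc s _ => scanGo_inter op hop s acc)

lemma B_normal :
    ∀ (oplist : List String), "" ∉ oplist → ∀ (strlist : List String),
      stringdivision_alt strlist oplist
      = oplist.foldl (fun l op => l.flatMap (inter op)) strlist := by
  intro oplist
  induction oplist with
  | nil => intro _ strlist; rfl
  | cons op rest ih =>
    intro hmem strlist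
    have hop : op ≠ "" := by
      intro h; exact hmem (by rw [h]; exact List.mem_cons_self)
    have hrest : "" ∉ rest := fun h => hmem (List.mem_cons_of_mem _ h)
    show stringdivision_alt _ rest = _
    rw [passB op hop strlist, ih hrest, List.foldl_cons]

-- ---- the degenerate admitted corner: empty strlist stays empty ----

lemma A_empty (oplist : List String) : stringdivision [] oplist = [] := by
  rw [A_normal]
  induction oplist with
  | nil => rfl
  | cons op rest ih => simpa using ih

lemma B_empty (oplist : List String) : stringdivision_alt [] oplist = [] := by
  induction oplist with
  | nil => rfl
  | cons op rest ih => exact ih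

-- ===== VERDICT (by name: the statement is the Claim_ definition above) =====
theorem stringdivision_spec : Claim_equal_stringdivision := by
  intro strlist oplist _ hpre
  unfold Spec_stringdivision
  rcases hpre with h | h
  · subst h; rw [A_empty, B_empty]
  · rw [A_normal, B_normal oplist h strlist]
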